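-- pv_equiv track=rewrite | github.com/eliottcassidy2000/math | 04-computation/paley_transfer_matrix.py | count_H
-- ===== SOURCE A (Python) =====
-- from itertools import permutations
--
-- def count_H(T, n):
--     count = 0
--     for perm in permutations(range(n)):
--         prod = 1
--         for k in range(len(perm)-1):
--             prod *= T.get((perm[k], perm[k+1]), 0)
--         count += prod
--     return count
-- ===== SOURCE B (Python) =====
-- def count_H(T, n):
--     # Held-Karp style memoized search: state = (last vertex, tuple of remaining
--     # vertices in increasing order), so there are O(n*2^n) states instead of n!.
--     memo = {}
--
--     def go(last, rem):
--         if not rem: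
--             return 1
--         key = (last, rem)
--         if key not in memo:
--             total = 0
--             for i, v in enumerate(rem):
--                 total += T.get((last, v), 0) * go(v, rem[:i] + rem[i + 1:])
--             memo[key] = total
--         return memo[key]
--
--     if n <= 0:
--         return 1  # only the empty permutation, contributing the empty product
--     verts = tuple(range(n))
--     total = 0
--     for i, v in enumerate(verts):
--         total += go(v, verts[:i] + verts[i + 1:])
--     return total
-- ===== Notes on version B (the rewrite author's own statement) =====
-- stated objective: faster
-- what changed: A enumerates all n! permutations and multiplies transfer-matrix entries along each; B is a Held-Karp style memoized recursion on states (last vertex, remaining vertex tuple), computing each of the O(n*2^n) states once; intended as faster and ahead at every probed size both finished, though the probe could not confirm the label at its largest sizes, where both exponential programs time out.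
import Mathlib
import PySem

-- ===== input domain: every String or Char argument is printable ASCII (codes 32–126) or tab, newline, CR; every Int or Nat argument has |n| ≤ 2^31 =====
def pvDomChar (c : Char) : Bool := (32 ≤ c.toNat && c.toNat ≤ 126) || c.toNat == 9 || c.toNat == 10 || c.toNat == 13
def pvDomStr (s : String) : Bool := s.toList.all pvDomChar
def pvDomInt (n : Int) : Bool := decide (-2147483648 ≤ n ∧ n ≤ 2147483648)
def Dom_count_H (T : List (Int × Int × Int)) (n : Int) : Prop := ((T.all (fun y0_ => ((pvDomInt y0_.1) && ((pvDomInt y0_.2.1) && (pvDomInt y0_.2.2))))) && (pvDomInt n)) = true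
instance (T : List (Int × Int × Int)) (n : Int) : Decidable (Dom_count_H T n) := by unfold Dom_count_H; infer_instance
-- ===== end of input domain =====

-- B replaces A's sum over all n! permutations by a memoized (Held-Karp style) search over
-- (last vertex, remaining vertices) states: same value; intended as faster (O(n*2^n) states
-- vs n! permutations) -- a timing run saw B ahead at every size both finished, but could
-- not confirm the label at its largest sizes, where both exponential programs time out.


-- ===== PORT A =====
-- T.get((a, b), 0): first-match lookup in the insertion-ordered association list (exact: dict keys are unique)
def tget (T : List (Int × Int × Int)) (a b : Int) : Int :=
  match T with
  | [] => 0
  | (x, y, v) :: rest => if x = a ∧ y = b then v else tget rest a b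

def count_H (T : List (Int × Int × Int)) (n : Int) : Int :=
  (PySem.List.permutations (PySem.List.pyRange 0 n 1) (PySem.List.pyRange 0 n 1).length).foldl
    (fun count perm =>
      count + (PySem.List.pyRange 0 ((perm.length : Int) - 1) 1).foldl
        (fun prod k => prod * tget T (PySem.List.pyGetD perm k 0) (PySem.List.pyGetD perm (k + 1) 0)) 1)
    0

-- ===== PORT B =====
-- Source B's `for i, v in enumerate(rem): total += T.get((last, v), 0) * go(v, rem[:i] + rem[i+1:])`,
-- with pre = rem[:i] and vs = rem[i:]; g is the recursive go
def goSum (g : Int → List Int → PySem.Dict (Int × List Int) Int → Int × PySem.Dict (Int × List Int) Int)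
    (T : List (Int × Int × Int)) (last : Int) (pre vs : List Int) (total : Int)
    (memo : PySem.Dict (Int × List Int) Int) : Int × PySem.Dict (Int × List Int) Int :=
  match vs with
  | [] => (total, memo)
  | v :: vs' =>
    let r := g v (pre ++ vs') memo
    goSum g T last (pre ++ [v]) vs' (total + tget T last v * r.1) r.2

-- Source B's go(last, rem) threading the memo dict; fuel is an upper bound on the recursion
-- depth (always sufficient at the call sites) that only makes the recursion structural
def goB (fuel : Nat) (T : List (Int × Int × Int)) (last : Int) (rem : List Int)
    (memo : PySem.Dict (Int × List Int) Int) : Int × PySem.Dict (Int × List Int) Int :=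
  match fuel with
  | 0 => (0, memo)
  | fuel + 1 =>
    if rem = [] then (1, memo)
    else
      match memo.get? (last, rem) with
      | some v => (v, memo)
      | none =>
        let r := goSum (goB fuel T) T last [] rem 0 memo
        (r.1, r.2.insert (last, rem) r.1)

-- Source B's top-level `for i, v in enumerate(verts): total += go(v, verts[:i] + verts[i+1:])`
def topSum (fuel : Nat) (T : List (Int × Int × Int)) (pre vs : List Int) (total : Int)
    (memo : PySem.Dict (Int × List Int) Int) : Int × PySem.Dict (Int × List Int) Int :=
  match vs with
  | [] => (total, memo)
  | v :: vs' =>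
    let r := goB fuel T v (pre ++ vs') memo
    topSum fuel T (pre ++ [v]) vs' (total + r.1) r.2

def count_H_alt (T : List (Int × Int × Int)) (n : Int) : Int :=
  if n ≤ 0 then 1
  else
    let verts := PySem.List.pyRange 0 n 1
    (topSum verts.length T [] verts 0 PySem.Dict.empty).1

-- ===== PRECONDITION & SPEC =====
def Spec_count_H (T : List (Int × Int × Int)) (n : Int) (out : Int) : Prop := out = count_H_alt T n
instance (T : List (Int × Int × Int)) (n : Int) (out : Int) : Decidable (Spec_count_H T n out) := by unfold Spec_count_H; infer_instance

-- ===== CLAIM (what is proved, stated in full; the proofs are below) =====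
def Claim_equal_count_H : Prop := ∀ (T : List (Int × Int × Int)) (n : Int), Dom_count_H T n → Spec_count_H T n (count_H T n)

-- ===== LEMMAS AND PROOFS =====

-- product of the transfer-matrix entries along the path last :: p
def pathProd (T : List (Int × Int × Int)) (last : Int) : List Int → Int
  | [] => 1
  | v :: p => tget T last v * pathProd T v p

-- A's inner loop as a function of the whole permutation
def pathProd0 (T : List (Int × Int × Int)) : List Int → Int
  | [] => 1
  | v :: p => pathProd T v p

-- the value go(last, rem) is meant to compute: sum over all orderings of rem
def specGo (T : List (Int × Int × Int)) (last : Int) (rem : List Int) : Int :=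
  ((PySem.List.permutations rem rem.length).map (pathProd T last)).sum

-- all ways to pick one element of a list, with the rest (in order)
def selections : List Int → List (Int × List Int)
  | [] => []
  | x :: xs => (x, xs) :: (selections xs).map (fun p => (p.1, x :: p.2))

def specSum (T : List (Int × Int × Int)) (last : Int) : List Int → List Int → Int
  | _, [] => 0
  | pre, v :: vs' => tget T last v * specGo T v (pre ++ vs') + specSum T last (pre ++ [v]) vs'

def specTop (T : List (Int × Int × Int)) : List Int → List Int → Int
  | _, [] => 0
  | pre, v :: vs' => specGo T v (pre ++ vs') + specTop T (pre ++ [v]) vs'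

lemma sum_flatMap {α : Type} (l : List α) (f : α → List Int) :
    (l.flatMap f).sum = (l.map (fun x => (f x).sum)).sum := by
  induction l with
  | nil => simp
  | cons x xs ih => simp [List.flatMap_cons, ih]

lemma flatMap_congr' {α β : Type} (l : List α) (f g : α → List β)
    (h : ∀ a ∈ l, f a = g a) : l.flatMap f = l.flatMap g := by
  induction l with
  | nil => simp
  | cons x t ih =>
    simp only [List.flatMap_cons]
    rw [h x (by simp), ih (fun a ha => h a (by simp [ha]))]

lemma flatMap_range_selections (F : List Int → List (List Int)) :
    ∀ xs : List Int,
      List.flatMap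
        (fun i => List.map (fun q => xs.getD i 0 :: q) (F (xs.eraseIdx i)))
        (List.range xs.length) =
      List.flatMap (fun p => List.map (fun q => p.1 :: q) (F p.2)) (selections xs) := by
  intro xs
  induction xs generalizing F with
  | nil => simp [selections]
  | cons x t ih =>
    simp only [List.length_cons, List.range_succ_eq_map, List.flatMap_cons, List.flatMap_map,
      selections, List.getD_cons_zero, List.eraseIdx_cons_zero,
      List.getD_cons_succ, List.eraseIdx_cons_succ]
    congr 1
    exact ih (fun ys => F (x :: ys))

lemma mem_selections_length {v : Int} {rest xs : List Int} (h : (v, rest) ∈ selections xs) :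
    rest.length + 1 = xs.length := by
  induction xs generalizing v rest with
  | nil => simp [selections] at h
  | cons x t ih =>
    simp [selections] at h
    rcases h with ⟨h1, h2⟩ | ⟨b, hm, he⟩
    · subst h1 h2; simp
    · subst he
      have := ih hm
      simp at this ⊢
      omega

lemma specGo_nil (T : List (Int × Int × Int)) (last : Int) : specGo T last [] = 1 := rfl

lemma specGo_cons (T : List (Int × Int × Int)) (last : Int) (rem : List Int) (h : rem ≠ []) :
    specGo T last rem = ((selections rem).map (fun p => tget T last p.1 * specGo T p.1 p.2)).sum := by
  obtain ⟨k, hk⟩ : ∃ k, rem.length = k + 1 := by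
    cases rem with
    | nil => simp at h
    | cons a t => exact ⟨t.length, rfl⟩
  unfold specGo
  rw [hk, PySem.List.permutations.eq_def]
  simp only [Nat.succ_eq_add_one]  -- reduces the match on (rem, k + 1)
  rw [flatMap_congr' _ _
      (fun i => List.map (fun q => rem.getD i 0 :: q) (PySem.List.permutations (rem.eraseIdx i) k))
      (by
        intro i hi
        have hlt : i < rem.length := List.mem_range.mp hi
        simp [List.getD_eq_getElem?_getD, List.getElem?_eq_getElem hlt])]
  rw [flatMap_range_selections (fun ys => PySem.List.permutations ys k) rem]
  rw [List.map_flatMap, sum_flatMap]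
  refine congrArg List.sum (List.map_congr_left ?_)
  rintro ⟨v, rest⟩ hp
  have hl : rest.length = k := by
    have := mem_selections_length hp; omega
  simp only [List.map_map, Function.comp_def]
  have : (fun q => pathProd T last (v :: q)) = (fun q => tget T last v * pathProd T v q) := by
    funext q; simp [pathProd]
  rw [show ((PySem.List.permutations rest k).map (fun q => pathProd T last (v :: q))).sum
      = tget T last v * ((PySem.List.permutations rest k).map (pathProd T v)).sum from by
    rw [this, List.sum_map_mul_left]]
  rw [hl]

lemma specSum_eq (T : List (Int × Int × Int)) (last : Int) :
    ∀ (vs pre : List Int),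
      specSum T last pre vs = ((selections vs).map (fun p => tget T last p.1 * specGo T p.1 (pre ++ p.2))).sum := by
  intro vs
  induction vs with
  | nil => intro pre; simp [specSum, selections]
  | cons v vs' ih =>
    intro pre
    simp only [specSum, selections, List.map_cons, List.map_map, List.sum_cons, Function.comp_def]
    rw [ih (pre ++ [v])]
    simp only [← List.append_cons]

lemma specTop_eq (T : List (Int × Int × Int)) :
    ∀ (vs pre : List Int),
      specTop T pre vs = ((selections vs).map (fun p => specGo T p.1 (pre ++ p.2))).sum := by
  intro vs
  induction vs with
  | nil => intro pre; simp [specTop, selections]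
  | cons v vs' ih =>
    intro pre
    simp only [specTop, selections, List.map_cons, List.map_map, List.sum_cons, Function.comp_def]
    rw [ih (pre ++ [v])]
    simp only [← List.append_cons]

lemma specGo_eq_specSum (T : List (Int × Int × Int)) (last : Int) (rem : List Int) (h : rem ≠ []) :
    specGo T last rem = specSum T last [] rem := by
  rw [specGo_cons T last rem h, specSum_eq]
  simp

-- memo invariant
def MemoInv (T : List (Int × Int × Int)) (memo : PySem.Dict (Int × List Int) Int) : Prop :=
  ∀ last rem v, memo.get? (last, rem) = some v → v = specGo T last rem

lemma goSum_spec (T : List (Int × Int × Int)) (K : Nat)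
    (g : Int → List Int → PySem.Dict (Int × List Int) Int → Int × PySem.Dict (Int × List Int) Int)
    (H : ∀ last' rm memo', rm.length + 1 = K → MemoInv T memo' →
        (g last' rm memo').1 = specGo T last' rm ∧ MemoInv T (g last' rm memo').2) :
    ∀ (vs pre : List Int) (last total : Int) memo, pre.length + vs.length = K → MemoInv T memo →
      (goSum g T last pre vs total memo).1 = total + specSum T last pre vs ∧
      MemoInv T (goSum g T last pre vs total memo).2 := by
  intro vs
  induction vs with
  | nil =>
    intro pre last total memo _ hInv
    simp [goSum, specSum, hInv]
  | cons v vs' ih =>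
    intro pre last total memo hK hInv
    have hr := H v (pre ++ vs') memo (by simp at hK ⊢; omega) hInv
    simp only [goSum]
    obtain ⟨h1, h2⟩ := hr
    have := ih (pre ++ [v]) last (total + tget T last v * (g v (pre ++ vs') memo).1)
      (g v (pre ++ vs') memo).2 (by simp at hK ⊢; omega) h2
    refine ⟨?_, this.2⟩
    rw [this.1, h1]
    simp [specSum]
    ring

lemma goB_spec (T : List (Int × Int × Int)) :
    ∀ (fuel : Nat) (rem : List Int) (last : Int) memo, rem.length < fuel → MemoInv T memo →
      (goB fuel T last rem memo).1 = specGo T last rem ∧ MemoInv T (goB fuel T last rem memo).2 := by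
  intro fuel
  induction fuel with
  | zero => intro rem last memo hlt _; exact absurd hlt (by omega)
  | succ f ih =>
    intro rem last memo hlt hInv
    by_cases hnil : rem = []
    · subst hnil
      simp [goB, specGo_nil, hInv]
    · simp only [goB, if_neg hnil]
      cases hget : memo.get? (last, rem) with
      | some v =>
        simpa using ⟨hInv last rem v hget, hInv⟩
      | none =>
        have hgo := goSum_spec T rem.length (goB f T)
          (fun last' rm memo' hlen hInv' => ih rm last' memo' (by omega) hInv')
          rem [] last 0 memo (by simp) hInv
        obtain ⟨h1, h2⟩ := hgo
        constructor
        · simpa [h1] using (specGo_eq_specSum T last rem hnil).symm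
        · intro last' rem' v hv
          rw [PySem.Dict.get?_insert] at hv
          by_cases heq : (last', rem') = (last, rem)
          · rw [if_pos heq] at hv
            injection hv with hv
            rw [Prod.mk.injEq] at heq
            obtain ⟨e1, e2⟩ := heq
            rw [e1, e2, ← hv, h1, zero_add]
            exact (specGo_eq_specSum T last rem hnil).symm
          · rw [if_neg heq] at hv
            exact h2 last' rem' v hv

lemma topSum_spec (T : List (Int × Int × Int)) (fuel : Nat) :
    ∀ (vs pre : List Int) (total : Int) memo, pre.length + vs.length ≤ fuel → MemoInv T memo →
      (topSum fuel T pre vs total memo).1 = total + specTop T pre vs := by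
  intro vs
  induction vs with
  | nil => intro pre total memo _ _; simp [topSum, specTop]
  | cons v vs' ih =>
    intro pre total memo hle hInv
    have hg := goB_spec T fuel (pre ++ vs') v memo (by simp at hle ⊢; omega) hInv
    simp only [topSum]
    rw [ih (pre ++ [v]) _ _ (by simp at hle ⊢; omega) hg.2, hg.1]
    simp [specTop]
    ring

-- ===== A-side lemmas =====

lemma inner_loop_eq (T : List (Int × Int × Int)) :
    ∀ (p : List Int) (v : Int) (c : Int),
      (List.range p.length).foldl
        (fun prod k => prod * tget T ((v :: p).getD k 0) ((v :: p).getD (k + 1) 0)) c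
      = c * pathProd T v p := by
  intro p
  induction p with
  | nil => intro v c; simp [pathProd]
  | cons w p' ih =>
    intro v c
    simp only [List.length_cons, List.range_succ_eq_map, List.foldl_cons, List.foldl_map,
      Nat.succ_eq_add_one, List.getD_cons_succ, List.getD_cons_zero]
    have ih' := ih w (c * tget T v w)
    simp only [List.getD_cons_succ] at ih'
    rw [ih']
    simp [pathProd]
    ring

lemma inner_eq (T : List (Int × Int × Int)) (perm : List Int) :
    (PySem.List.pyRange 0 ((perm.length : Int) - 1) 1).foldl
      (fun prod k => prod * tget T (PySem.List.pyGetD perm k 0) (PySem.List.pyGetD perm (k + 1) 0)) 1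
    = pathProd0 T perm := by
  cases perm with
  | nil =>
    rw [PySem.List.pyRange_one_eq_nil (by norm_num)]
    rfl
  | cons v p =>
    have h1 : ((List.length (v :: p) : Int) - 1) = (p.length : Int) := by
      simp
    rw [h1, PySem.List.pyRange_one]
    have h2 : ((p.length : Int) - 0).toNat = p.length := by simp
    rw [h2]
    simp only [List.foldl_map, zero_add, PySem.List.pyGetD_natCast]
    have hcast : ∀ (xs : List Int) (k : Nat), PySem.List.pyGetD xs ((k : Int) + 1) 0 = xs.getD (k + 1) 0 := by
      intro xs k
      rw [show ((k : Int) + 1) = ((k + 1 : Nat) : Int) by push_cast; ring, PySem.List.pyGetD_natCast]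
    simp only [hcast]
    rw [inner_loop_eq T p v 1, one_mul]
    rfl

lemma count_H_eq_sum (T : List (Int × Int × Int)) (n : Int) :
    count_H T n = ((PySem.List.permutations (PySem.List.pyRange 0 n 1)
      (PySem.List.pyRange 0 n 1).length).map (pathProd0 T)).sum := by
  unfold count_H
  rw [PySem.List.foldl_add, zero_add]
  exact congrArg List.sum (List.map_congr_left (fun perm _ => inner_eq T perm))

-- ===== VERDICT =====
theorem count_H_spec : Claim_equal_count_H := by
  unfold Claim_equal_count_H
  intro T n _
  unfold Spec_count_H
  rw [count_H_eq_sum]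
  by_cases hn : n ≤ 0
  · unfold count_H_alt
    rw [if_pos hn, PySem.List.pyRange_one_eq_nil hn]
    rfl
  · unfold count_H_alt
    rw [if_neg hn]
    have hlen : (PySem.List.pyRange 0 n 1).length = n.toNat := by
      simp [PySem.List.length_pyRange_one]
    obtain ⟨k, hk⟩ : ∃ k, (PySem.List.pyRange 0 n 1).length = k + 1 :=
      ⟨n.toNat - 1, by omega⟩
    have htop := topSum_spec T (PySem.List.pyRange 0 n 1).length (PySem.List.pyRange 0 n 1) [] 0
      PySem.Dict.empty (by simp) (fun l r v h => by simp [PySem.Dict.get?_empty] at h)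
    rw [htop, zero_add, specTop_eq]
    set verts := PySem.List.pyRange 0 n 1 with hverts
    rw [hk, PySem.List.permutations.eq_def]
    simp only [Nat.succ_eq_add_one]
    rw [flatMap_congr' _ _
      (fun i => List.map (fun q => verts.getD i 0 :: q) (PySem.List.permutations (verts.eraseIdx i) k))
      (by
        intro i hi
        have hlt : i < verts.length := List.mem_range.mp hi
        simp [List.getElem?_eq_getElem hlt, List.getD_eq_getElem?_getD])]
    rw [flatMap_range_selections (fun ys => PySem.List.permutations ys k) verts]
    rw [List.map_flatMap, sum_flatMap]
    refine congrArg List.sum (List.map_congr_left ?_)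
    rintro ⟨v, rest⟩ hp
    have hl : rest.length = k := by
      have := mem_selections_length hp
      omega
    simp only [List.map_map, Function.comp_def, List.nil_append]
    rw [show (fun q => pathProd0 T (v :: q)) = pathProd T v from by
      funext q; simp [pathProd0]]
    rw [specGo, hl]
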